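-- pv_equiv track=rewrite | github.com/vevurka/mt-lob | states/states.py | unhash_state
-- ===== SOURCE A (Python) =====
-- def unhash_state(state_num, state_labels):
--     state = {}
--     for i in range(len(state_labels)-1, -1, -1):
--         if state_num // (3 ** i) >= 1:
--             n = state_num // (3 ** i)
--             state_num -= n * 3 ** i
--             state[state_labels[i]] = n - 1
--         else:
--             state[state_labels[i]] = - 1
--     return state
-- ===== SOURCE B (Python) =====
-- def unhash_state(state_num, state_labels):
--     # Decode state_num as base-3 digits (low to high) with a single running
--     # remainder; the highest label absorbs any overflow quotient.  A negative
--     # state_num encodes nothing: every label maps to -1 (digit 0).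
--     k = len(state_labels)
--     if state_num < 0:
--         digits = [0] * k
--     else:
--         digits = []
--         rem = state_num
--         for j in range(k):
--             if j == k - 1:
--                 digits.append(rem)
--             else:
--                 digits.append(rem % 3)
--                 rem //= 3
--     return {state_labels[i]: digits[i] - 1 for i in range(k - 1, -1, -1)}
-- ===== Notes on version B (the rewrite author's own statement) =====
-- stated objective: faster
-- what changed: B replaces A's high-to-low loop that recomputes the big-integer power 3**i and subtracts n*3**i at every position with a single low-to-high pass threading one running remainder (d = rem % 3; rem //= 3, the top label absorbing the final quotient; negative inputs decode to all -1 via one explicit branch), and builds the dict in one comprehension.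
import Mathlib
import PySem

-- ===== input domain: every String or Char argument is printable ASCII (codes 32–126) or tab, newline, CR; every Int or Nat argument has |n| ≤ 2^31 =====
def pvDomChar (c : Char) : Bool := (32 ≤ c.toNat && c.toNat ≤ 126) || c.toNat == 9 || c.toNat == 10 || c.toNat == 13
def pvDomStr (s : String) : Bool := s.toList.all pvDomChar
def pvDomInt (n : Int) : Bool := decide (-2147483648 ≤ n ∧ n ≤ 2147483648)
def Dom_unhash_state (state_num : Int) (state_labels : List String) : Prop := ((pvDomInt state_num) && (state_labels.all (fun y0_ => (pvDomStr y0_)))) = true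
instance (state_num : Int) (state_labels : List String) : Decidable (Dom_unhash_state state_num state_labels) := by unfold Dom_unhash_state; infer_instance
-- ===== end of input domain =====

-- B decodes the base-3 state with ONE running remainder threaded low→high (the top label
-- absorbs the overflow quotient), instead of A's per-position 3**i power and subtraction;
-- objective: faster (one O(k)-division pass instead of a fresh big power per position; measured faster in a timing run).


-- ===== PORT A =====
-- literal port of A: countdown over i = len-1 … 0, recomputing state_num // 3**i each step;
-- state_labels[i] is always in range (0 ≤ i < len), so pyGetD's default is never used.
def unhash_state (state_num : Int) (state_labels : List String) : List (String × Int) :=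
  ((PySem.List.pyRange (PySem.List.len state_labels - 1) (-1) (-1)).foldl
    (fun (st : Int × PySem.Dict String Int) i =>
      if PySem.Int.floordiv st.1 (3 ^ i.toNat) ≥ 1 then
        let n := PySem.Int.floordiv st.1 (3 ^ i.toNat)
        (st.1 - n * 3 ^ i.toNat,
         st.2.insert (PySem.List.pyGetD state_labels i "") (n - 1))
      else
        (st.1, st.2.insert (PySem.List.pyGetD state_labels i "") (-1)))
    (state_num, PySem.Dict.empty)).2.items

-- ===== PORT B =====
-- literal port of Source B: digits low→high with a running remainder, then the dict
-- comprehension over range(k-1, -1, -1); indices are always in range.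
def unhash_state_alt (state_num : Int) (state_labels : List String) : List (String × Int) :=
  let k : Int := PySem.List.len state_labels
  let digits : List Int :=
    if state_num < 0 then List.replicate k.toNat 0
    else
      ((PySem.List.pyRange 0 k 1).foldl
        (fun (st : List Int × Int) j =>
          if j = k - 1 then (st.1 ++ [st.2], st.2)
          else (st.1 ++ [PySem.Int.mod st.2 3], PySem.Int.floordiv st.2 3))
        ([], state_num)).1
  ((PySem.List.pyRange (k - 1) (-1) (-1)).foldl
    (fun (d : PySem.Dict String Int) i =>
      d.insert (PySem.List.pyGetD state_labels i "") (PySem.List.pyGetD digits i 0 - 1))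
    PySem.Dict.empty).items

-- ===== PRECONDITION & SPEC =====
def Spec_unhash_state (state_num : Int) (state_labels : List String) (out : List (String × Int)) : Prop := out = unhash_state_alt state_num state_labels
instance (state_num : Int) (state_labels : List String) (out : List (String × Int)) : Decidable (Spec_unhash_state state_num state_labels out) := by unfold Spec_unhash_state; infer_instance

-- ===== CLAIM (what is proved, stated in full; the proofs are below) =====
def Claim_equal_unhash_state : Prop := ∀ (state_num : Int) (state_labels : List String), Dom_unhash_state state_num state_labels → Spec_unhash_state state_num state_labels (unhash_state state_num state_labels)

-- ===== LEMMAS AND PROOFS =====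

-- A's loop body, abbreviated for the lemmas below.
def pvAstep (labels : List String) (st : Int × PySem.Dict String Int) (i : Int) :
    Int × PySem.Dict String Int :=
  if PySem.Int.floordiv st.1 (3 ^ i.toNat) ≥ 1 then
    let n := PySem.Int.floordiv st.1 (3 ^ i.toNat)
    (st.1 - n * 3 ^ i.toNat,
     st.2.insert (PySem.List.pyGetD labels i "") (n - 1))
  else
    (st.1, st.2.insert (PySem.List.pyGetD labels i "") (-1))

lemma pv_fd (a : Int) (p : Nat) : PySem.Int.floordiv a (3 ^ p) = a / 3 ^ p :=
  PySem.Int.floordiv_eq_ediv_of_pos (by positivity)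

lemma pv_A_neg (labels : List String) (l : List Int) :
    ∀ (s : Int) (d : PySem.Dict String Int), s < 0 →
    l.foldl (pvAstep labels) (s, d) =
      (s, l.foldl (fun d i => d.insert (PySem.List.pyGetD labels i "") (-1)) d) := by
  induction l with
  | nil => intro s d _; rfl
  | cons a l ih =>
    intro s d hs
    have hg : ¬ (PySem.Int.floordiv s (3 ^ a.toNat) ≥ 1) := by
      rw [pv_fd]
      have := Int.ediv_neg_of_neg_of_pos hs (by positivity : (0:Int) < 3 ^ a.toNat)
      omega
    simp only [List.foldl_cons, pvAstep, hg, if_false]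
    exact ih s _ hs

lemma pv_step (labels : List String) (s : Int) (i : Int) (d : PySem.Dict String Int)
    (hs : 0 ≤ s) :
    pvAstep labels (s, d) i =
      (s % 3 ^ i.toNat, d.insert (PySem.List.pyGetD labels i "") (s / 3 ^ i.toNat - 1)) := by
  have hp : (0:Int) < 3 ^ i.toNat := by positivity
  have hd : s % 3 ^ i.toNat = s - 3 ^ i.toNat * (s / 3 ^ i.toNat) := Int.emod_def s _
  have hn : 0 ≤ s / 3 ^ i.toNat := Int.ediv_nonneg hs hp.le
  unfold pvAstep
  rw [pv_fd]
  by_cases h : 1 ≤ s / 3 ^ i.toNat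
  · simp only [ge_iff_le, h, if_true]
    simp only [Prod.mk.injEq]
    exact ⟨by rw [hd]; ring, trivial⟩
  · simp only [ge_iff_le, h, if_false]
    have h0 : s / 3 ^ i.toNat = 0 := by omega
    simp only [Prod.mk.injEq]
    exact ⟨by rw [hd, h0]; ring, by rw [h0]; norm_num⟩

lemma pv_w_mod (s : Int) (i m : Nat) (h : i < m) :
    s % 3 ^ m / 3 ^ i % 3 = s / 3 ^ i % 3 := by
  obtain ⟨d, rfl⟩ : ∃ d, m = i + d + 1 := ⟨m - i - 1, by omega⟩
  have key : s % 3 ^ (i + d + 1) = s + (-(3 ^ (d + 1) * (s / 3 ^ (i + d + 1)))) * 3 ^ i := by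
    rw [Int.emod_def]; ring
  rw [key, Int.add_mul_ediv_right _ _ (by positivity : ((3:Int) ^ i) ≠ 0),
    show (-(3 ^ (d + 1) * (s / 3 ^ (i + d + 1)))) = (-(3 ^ d * (s / 3 ^ (i + d + 1)))) * 3 by ring,
    Int.add_mul_emod_self_right]

lemma pv_A_descend (labels : List String) (m : Nat) :
    ∀ (s : Int) (d : PySem.Dict String Int), 0 ≤ s → s < 3 ^ (m + 1) →
    ((PySem.List.pyRange (m : Int) (-1) (-1)).foldl (pvAstep labels) (s, d)).2 =
      (PySem.List.pyRange (m : Int) (-1) (-1)).foldl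
        (fun d i => d.insert (PySem.List.pyGetD labels i "") (s / 3 ^ i.toNat % 3 - 1)) d := by
  induction m with
  | zero =>
    intro s d hs hb
    rw [PySem.List.pyRange_neg_one_cons (by norm_num),
        PySem.List.pyRange_neg_one_eq_nil (by norm_num)]
    simp only [List.foldl_cons, List.foldl_nil, Nat.cast_zero]
    rw [pv_step labels s 0 d hs]
    have hsm : s % 3 = s := Int.emod_eq_of_lt hs (by simpa using hb)
    simp [hsm]
  | succ m ih =>
    intro s d hs hb
    have hc : (-1 : Int) < ((m + 1 : Nat) : Int) := by push_cast; omega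
    rw [PySem.List.pyRange_neg_one_cons hc]
    simp only [List.foldl_cons]
    rw [pv_step labels s ((m + 1 : Nat) : Int) d hs]
    have ht : (((m + 1 : Nat) : Int)).toNat = m + 1 := by simp
    have h1 : ((m + 1 : Nat) : Int) - 1 = (m : Int) := by push_cast; ring
    rw [ht, h1]
    have hs' : 0 ≤ s % 3 ^ (m + 1) := Int.emod_nonneg s (by positivity)
    have hb' : s % 3 ^ (m + 1) < 3 ^ (m + 1) := Int.emod_lt_of_pos s (by positivity)
    rw [ih _ _ hs' hb']
    have hq : s / 3 ^ (m + 1) % 3 = s / 3 ^ (m + 1) := by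
      refine Int.emod_eq_of_lt (Int.ediv_nonneg hs (by positivity)) ?_
      have h2 : PySem.Int.floordiv s (3 ^ (m + 1)) < 3 := by
        rw [PySem.Int.floordiv_lt_iff_lt_mul (by positivity)]
        calc s < 3 ^ (m + 1 + 1) := hb
          _ = 3 * 3 ^ (m + 1) := by ring
      rw [pv_fd] at h2; exact h2
    rw [hq]
    refine PySem.List.foldl_congr_mem _ _ _ _ ?_
    intro acc x hx
    rw [PySem.List.mem_pyRange_neg_one] at hx
    have hxt : x.toNat < m + 1 := by omega
    rw [pv_w_mod s x.toNat (m + 1) hxt]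

lemma pv_fd3 (a : Int) : PySem.Int.floordiv a 3 = a / 3 :=
  PySem.Int.floordiv_eq_ediv_of_pos (by norm_num)
lemma pv_md3 (a : Int) : PySem.Int.mod a 3 = a % 3 :=
  PySem.Int.mod_eq_emod_of_pos (by norm_num)
lemma pv_dd (a : Int) (m : Nat) : a / 3 ^ m / 3 = a / 3 ^ (m + 1) := by
  rw [Int.ediv_ediv_of_nonneg (show (0:Int) ≤ 3 ^ m by positivity), pow_succ]

lemma pv_plain (m : Nat) (s : Int) (acc : List Int) :
    (PySem.List.pyRange 0 (m : Int) 1).foldl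
      (fun (st : List Int × Int) _ => (st.1 ++ [PySem.Int.mod st.2 3], PySem.Int.floordiv st.2 3))
      (acc, s)
    = (acc ++ (List.range m).map (fun j => s / 3 ^ j % 3), s / 3 ^ m) := by
  induction m with
  | zero => simp [PySem.List.pyRange_one_eq_nil]
  | succ m ih =>
    have hc : ((m + 1 : Nat) : Int) = (m : Int) + 1 := by push_cast; ring
    rw [hc, PySem.List.pyRange_one_succ_right (by positivity), List.foldl_append, ih]
    simp only [List.foldl_cons, List.foldl_nil]
    rw [pv_md3, pv_fd3, pv_dd, List.range_succ, List.map_append, List.map_cons, List.map_nil,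
      List.append_assoc]

lemma pv_B_digits (k : Nat) (hk : 1 ≤ k) (s : Int) :
    ((PySem.List.pyRange 0 (k : Int) 1).foldl
      (fun (st : List Int × Int) j =>
        if j = (k : Int) - 1 then (st.1 ++ [st.2], st.2)
        else (st.1 ++ [PySem.Int.mod st.2 3], PySem.Int.floordiv st.2 3))
      ([], s)).1 =
    (List.range (k - 1)).map (fun j => s / 3 ^ j % 3) ++ [s / 3 ^ (k - 1)] := by
  have hrange : PySem.List.pyRange 0 (k : Int) 1
      = PySem.List.pyRange 0 ((k : Int) - 1) 1 ++ [(k : Int) - 1] := by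
    conv_lhs => rw [show (k : Int) = ((k : Int) - 1) + 1 by ring]
    exact PySem.List.pyRange_one_succ_right (by omega)
  rw [hrange, List.foldl_append]
  have hpre : (PySem.List.pyRange 0 ((k : Int) - 1) 1).foldl
      (fun (st : List Int × Int) j =>
        if j = (k : Int) - 1 then (st.1 ++ [st.2], st.2)
        else (st.1 ++ [PySem.Int.mod st.2 3], PySem.Int.floordiv st.2 3)) ([], s)
      = (PySem.List.pyRange 0 ((k : Int) - 1) 1).foldl
      (fun (st : List Int × Int) _ =>
        (st.1 ++ [PySem.Int.mod st.2 3], PySem.Int.floordiv st.2 3)) ([], s) := by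
    refine PySem.List.foldl_congr_mem _ _ _ _ ?_
    intro acc x hx
    rw [PySem.List.mem_pyRange_one] at hx
    rw [if_neg (by omega)]
  have hcast : ((k : Int) - 1) = ((k - 1 : Nat) : Int) := by omega
  rw [hpre, hcast, pv_plain]
  simp only [List.foldl_cons, List.foldl_nil, if_true, List.nil_append]

lemma pv_A_full (labels : List String) (k : Nat) (hk : 1 ≤ k) (s : Int) (hs : 0 ≤ s)
    (d : PySem.Dict String Int) :
    ((PySem.List.pyRange ((k : Int) - 1) (-1) (-1)).foldl (pvAstep labels) (s, d)).2 =
      (PySem.List.pyRange ((k : Int) - 1) (-1) (-1)).foldl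
        (fun d i => d.insert (PySem.List.pyGetD labels i "")
          (if i = (k : Int) - 1 then s / 3 ^ (k - 1) - 1 else s / 3 ^ i.toNat % 3 - 1)) d := by
  rw [PySem.List.pyRange_neg_one_cons (by omega : (-1:Int) < (k : Int) - 1)]
  simp only [List.foldl_cons]
  rw [pv_step labels s ((k : Int) - 1) d hs]
  have ht : ((k : Int) - 1).toNat = k - 1 := by omega
  rw [ht]
  simp only [if_true]
  by_cases h2 : k = 1
  · subst h2
    norm_num [PySem.List.pyRange_neg_one_eq_nil]
  · have hk2 : 2 ≤ k := by omega
    have hs' : 0 ≤ s % 3 ^ (k - 1) := Int.emod_nonneg s (by positivity)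
    have hb' : s % 3 ^ (k - 1) < 3 ^ (k - 2 + 1) := by
      rw [show k - 2 + 1 = k - 1 by omega]
      exact Int.emod_lt_of_pos s (by positivity)
    have hc2 : (k : Int) - 1 - 1 = ((k - 2 : Nat) : Int) := by omega
    rw [hc2, pv_A_descend labels (k - 2) _ _ hs' hb']
    refine PySem.List.foldl_congr_mem _ _ _ _ ?_
    intro acc x hx
    rw [PySem.List.mem_pyRange_neg_one] at hx
    rw [if_neg (by omega), pv_w_mod s x.toNat (k - 1) (by omega)]

lemma pvAstep_eq (s : Int) (labels : List String) :
    unhash_state s labels =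
    ((PySem.List.pyRange (PySem.List.len labels - 1) (-1) (-1)).foldl
      (pvAstep labels) (s, PySem.Dict.empty)).2.items := rfl

-- ===== VERDICT (by name: the statement is the Claim_ definition above) =====
theorem unhash_state_spec : Claim_equal_unhash_state := by
  intro s labels _
  unfold Spec_unhash_state
  rw [pvAstep_eq s labels]
  unfold unhash_state_alt
  simp only []
  rw [PySem.List.len_eq labels]
  simp only [Int.toNat_natCast]
  by_cases hneg : s < 0
  · rw [pv_A_neg labels _ s _ hneg, if_pos hneg]
    congr 1
    refine PySem.List.foldl_congr_mem _ _ _ _ ?_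
    intro acc x hx
    rw [PySem.List.mem_pyRange_neg_one] at hx
    rw [PySem.List.pyGetD_eq_getElem (List.replicate labels.length (0:Int)) 0 (by omega)
      (by simp; omega)]
    simp
  · have hs : 0 ≤ s := by omega
    by_cases hk0 : labels.length = 0
    · simp [hk0, PySem.List.pyRange_neg_one_eq_nil]
    · have hk1 : 1 ≤ labels.length := by omega
      rw [pv_A_full labels labels.length hk1 s hs, if_neg hneg,
        pv_B_digits labels.length hk1 s]
      congr 1
      refine PySem.List.foldl_congr_mem _ _ _ _ ?_
      intro acc x hx
      rw [PySem.List.mem_pyRange_neg_one] at hx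
      have hx0 : (0:Int) ≤ x := by omega
      have hlen : ((List.range (labels.length - 1)).map (fun j => s / 3 ^ j % 3)
          ++ [s / 3 ^ (labels.length - 1)]).length = labels.length := by
        simp; omega
      rw [PySem.List.pyGetD_eq_getElem _ 0 hx0 (by rw [hlen]; omega)]
      by_cases hxeq : x = (labels.length : Int) - 1
      · rw [if_pos hxeq]
        have hidx : x.toNat = ((List.range (labels.length - 1)).map
            (fun j => s / 3 ^ j % 3)).length := by simp; omega
        congr 1
        rw [List.getElem_append_right (by omega)]
        simp [hidx]
      · rw [if_neg hxeq]
        have hxk : x.toNat < labels.length - 1 := by omega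
        rw [List.getElem_append_left (by simpa using hxk)]
        simp
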